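-- pv_equiv track=rewrite | github.com/elnits/VanGam | web_app.py | determine_computer_move
-- ===== SOURCE A (Python) =====
-- def determine_computer_move(q, l, r):
--     # Если оба стека пусты, игра завершена
--     if l == 0 and r == 0:
--         return 0, None
--
--     # Проверить, есть ли текущая позиция в списке "проигрышных позиций" (q)
--     for (q_l, q_r) in q:
--         if l == q_l and r == q_r:
--             # Если позиция является проигрышной, выбираем безопасный ход
--             if l > r:
--                 return 1, 'L'  # Уменьшить больший стек
--             else:
--                 return 1, 'R'
--
--     # Проверка, какой ход приведёт к позиции, где игрок выиграет
--     potential_moves = []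
--     for (q_l, q_r) in q:
--         # Проверим все возможные ходы:
--         # Уменьшить только левую кучу
--         if q_l <= l and q_r == r:
--             potential_moves.append(('L', l - q_l))
--
--         # Уменьшить только правую кучу
--         if q_r <= r and q_l == l:
--             potential_moves.append(('R', r - q_r))
--
--         # Уменьшить обе кучи (оба стека одновременно)
--         if q_l <= l and q_r <= r and (l - q_l == r - q_r):
--             potential_moves.append(('B', l - q_l))
--
--     # Если не найдено подходящей стратегии, сделать безопасный ход
--     if potential_moves:
--         # Рассмотрим все возможные ходы и выберем тот, который не приведет к выигрышному ходу игрока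
--         for move, num in potential_moves:
--             if move == 'L' and num <= l:
--                 # Уменьшаем левую кучу
--                 new_l, new_r = l - num, r
--                 if new_l == 0 and new_r == 0:  # если это приведет к победе игрока
--                     continue  # пропускаем этот ход
--                 return num, 'L'
--
--             if move == 'R' and num <= r:
--                 # Уменьшаем правую кучу
--                 new_l, new_r = l, r - num
--                 if new_l == 0 and new_r == 0:  # если это приведет к победе игрока
--                     continue  # пропускаем этот ход
--                 return num, 'R'
--
--             if move == 'B' and num <= min(l, r):
--                 # Уменьшаем обе кучи
--                 new_l, new_r = l - num, r - num
--                 if new_l == 0 and new_r == 0:  # если это приведет к победе игрока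
--                     continue  # пропускаем этот ход
--                 return num, 'B'
--
--     # Если не найдено безопасного хода, делаем случайный (или фиксированный) ход
--     if l > r:
--         return 1, 'L'
--     else:
--         return 1, 'R'
-- ===== SOURCE B (Python) =====
-- def determine_computer_move(q, l, r):
--     # Argmin decomposition: three independent first-match index scans (L, R, B),
--     # then pick the entry at the minimal index with tie priority L < R < B.
--     if l == 0 and r == 0:
--         return 0, None
--     safe = (1, 'L') if l > r else (1, 'R')
--     if (l, r) in q:
--         return safe
--     n = len(q)
--     iL = next((i for i, (ql, qr) in enumerate(q)
--                if 0 <= ql <= l and qr == r and not (ql == 0 and r == 0)), n)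
--     iR = next((i for i, (ql, qr) in enumerate(q)
--                if 0 <= qr <= r and ql == l and not (l == 0 and qr == 0)), n)
--     iB = next((i for i, (ql, qr) in enumerate(q)
--                if 0 <= ql <= l and 0 <= qr <= r and l - ql == r - qr
--                and not (ql == 0 and qr == 0)), n)
--     i = min(iL, iR, iB)
--     if i == n:
--         return safe
--     ql, qr = q[i]
--     if iL == i:
--         return l - ql, 'L'
--     if iR == i:
--         return r - qr, 'R'
--     return l - ql, 'B'
-- ===== Notes on version B (the rewrite author's own statement) =====
-- stated objective: alternative
-- what changed: B replaces A's accumulate-then-scan (build potential_moves, then early-return scan over it) with an argmin decomposition: three independent first-match index scans for the L/R/B candidate conditions, then one selection of the minimal index with tie priority L<R<B; the accumulator list and the early-return candidate loop disappear.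
import Mathlib
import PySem

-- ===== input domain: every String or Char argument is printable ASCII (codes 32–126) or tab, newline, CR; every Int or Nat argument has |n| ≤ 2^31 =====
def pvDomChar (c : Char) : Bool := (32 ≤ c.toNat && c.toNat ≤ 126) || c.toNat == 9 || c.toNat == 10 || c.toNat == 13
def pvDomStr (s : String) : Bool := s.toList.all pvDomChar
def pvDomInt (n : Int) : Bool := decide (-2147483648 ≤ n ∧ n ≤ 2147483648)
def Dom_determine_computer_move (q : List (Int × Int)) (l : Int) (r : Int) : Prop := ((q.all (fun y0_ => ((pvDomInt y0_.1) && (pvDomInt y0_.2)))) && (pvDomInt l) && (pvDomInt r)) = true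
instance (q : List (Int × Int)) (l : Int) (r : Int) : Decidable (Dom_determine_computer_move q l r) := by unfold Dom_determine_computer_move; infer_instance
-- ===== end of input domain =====

-- B replaces A's accumulate-then-scan with three independent first-match index
-- scans (L, R, B) plus an argmin selection with tie priority L < R < B (alternative).

-- ===== PORT A =====
-- first loop of A: return the safe move as soon as (l, r) is found in q
def pvMemLoop (l r : Int) : List (Int × Int) → Option (Int × Option String)
  | [] => none
  | (ql, qr) :: rest =>
    if l = ql ∧ r = qr then
      some (if l > r then (1, some "L") else (1, some "R"))
    else pvMemLoop l r rest

-- second loop of A: build potential_moves by appending per entry (L, R, B order)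
def pvBuildMoves (l r : Int) (q : List (Int × Int)) : List (String × Int) :=
  q.foldl (fun acc p =>
    ((acc ++ (if p.1 ≤ l ∧ p.2 = r then [("L", l - p.1)] else []))
         ++ (if p.2 ≤ r ∧ p.1 = l then [("R", r - p.2)] else []))
         ++ (if p.1 ≤ l ∧ p.2 ≤ r ∧ l - p.1 = r - p.2 then [("B", l - p.1)] else [])) []

-- third loop of A over potential_moves; falling off the loop reaches A's final default
def pvScanLoop (l r : Int) : List (String × Int) → Int × Option String
  | [] => if l > r then (1, some "L") else (1, some "R")
  | (move, num) :: rest =>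
    if move = "L" ∧ num ≤ l then
      (if l - num = 0 ∧ r = 0 then pvScanLoop l r rest else (num, some "L"))
    else if move = "R" ∧ num ≤ r then
      (if l = 0 ∧ r - num = 0 then pvScanLoop l r rest else (num, some "R"))
    else if move = "B" ∧ num ≤ min l r then
      (if l - num = 0 ∧ r - num = 0 then pvScanLoop l r rest else (num, some "B"))
    else pvScanLoop l r rest

def determine_computer_move (q : List (Int × Int)) (l : Int) (r : Int) : Int × Option String :=
  if l = 0 ∧ r = 0 then (0, none)
  else
    match pvMemLoop l r q with
    | some res => res
    | none =>
      let pm := pvBuildMoves l r q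
      if pm ≠ [] then pvScanLoop l r pm
      else if l > r then (1, some "L") else (1, some "R")

-- ===== PORT B =====
-- B's three candidate conditions (num ≤ limit and the (0,0)-skip solved into them)
def pvCondL (l r : Int) (p : Int × Int) : Bool :=
  decide (0 ≤ p.1 ∧ p.1 ≤ l ∧ p.2 = r ∧ ¬(p.1 = 0 ∧ r = 0))
def pvCondR (l r : Int) (p : Int × Int) : Bool :=
  decide (0 ≤ p.2 ∧ p.2 ≤ r ∧ p.1 = l ∧ ¬(l = 0 ∧ p.2 = 0))
def pvCondB (l r : Int) (p : Int × Int) : Bool :=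
  decide (0 ≤ p.1 ∧ p.1 ≤ l ∧ 0 ≤ p.2 ∧ p.2 ≤ r ∧ l - p.1 = r - p.2 ∧ ¬(p.1 = 0 ∧ p.2 = 0))

-- B's argmin selection over the three first-match indices (findIdx = length when absent,
-- exactly Python's next(..., len(q)))
def pvSelect (l r : Int) (q : List (Int × Int)) : Int × Option String :=
  let iL := q.findIdx (pvCondL l r)
  let iR := q.findIdx (pvCondR l r)
  let iB := q.findIdx (pvCondB l r)
  let i := min iL (min iR iB)
  if i = q.length then (if l > r then (1, some "L") else (1, some "R"))
  else
    let p := q.getD i (0, 0)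
    if iL = i then (l - p.1, some "L")
    else if iR = i then (r - p.2, some "R")
    else (l - p.1, some "B")

def determine_computer_move_alt (q : List (Int × Int)) (l : Int) (r : Int) : Int × Option String :=
  if l = 0 ∧ r = 0 then (0, none)
  else if (l, r) ∈ q then (if l > r then (1, some "L") else (1, some "R"))
  else pvSelect l r q

-- ===== PRECONDITION & SPEC =====
def Spec_determine_computer_move (q : List (Int × Int)) (l : Int) (r : Int) (out : Int × Option String) : Prop := out = determine_computer_move_alt q l r
instance (q : List (Int × Int)) (l : Int) (r : Int) (out : Int × Option String) : Decidable (Spec_determine_computer_move q l r out) := by unfold Spec_determine_computer_move; infer_instance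

-- ===== CLAIM (what is proved, stated in full; the proofs are below) =====
def Claim_equal_determine_computer_move : Prop := ∀ (q : List (Int × Int)) (l : Int) (r : Int), Dom_determine_computer_move q l r → Spec_determine_computer_move q l r (determine_computer_move q l r)

-- ===== LEMMAS AND PROOFS =====

-- proof-side single-scan characterisation shared by both ports
def pvAltLoop (l r : Int) : List (Int × Int) → Int × Option String
  | [] => if l > r then (1, some "L") else (1, some "R")
  | (ql, qr) :: rest =>
    if 0 ≤ ql ∧ ql ≤ l ∧ qr = r ∧ ¬(ql = 0 ∧ r = 0) then (l - ql, some "L")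
    else if 0 ≤ qr ∧ qr ≤ r ∧ ql = l ∧ ¬(l = 0 ∧ qr = 0) then (r - qr, some "R")
    else if 0 ≤ ql ∧ ql ≤ l ∧ 0 ≤ qr ∧ qr ≤ r ∧ l - ql = r - qr ∧ ¬(ql = 0 ∧ qr = 0) then
      (l - ql, some "B")
    else pvAltLoop l r rest

-- per-entry candidate list that A's foldl appends
def pvEntry (l r : Int) (p : Int × Int) : List (String × Int) :=
  ((if p.1 ≤ l ∧ p.2 = r then [("L", l - p.1)] else [])
    ++ (if p.2 ≤ r ∧ p.1 = l then [("R", r - p.2)] else []))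
    ++ (if p.1 ≤ l ∧ p.2 ≤ r ∧ l - p.1 = r - p.2 then [("B", l - p.1)] else [])

theorem pvBuildAux_eq (l r : Int) (q : List (Int × Int)) (acc : List (String × Int)) :
    List.foldl (fun acc p =>
      ((acc ++ (if p.1 ≤ l ∧ p.2 = r then [("L", l - p.1)] else []))
           ++ (if p.2 ≤ r ∧ p.1 = l then [("R", r - p.2)] else []))
           ++ (if p.1 ≤ l ∧ p.2 ≤ r ∧ l - p.1 = r - p.2 then [("B", l - p.1)] else [])) acc q
      = acc ++ q.flatMap (pvEntry l r) := by
  induction q generalizing acc with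
  | nil => simp
  | cons p rest ih =>
    rw [List.foldl_cons, ih, List.flatMap_cons]
    simp [pvEntry, List.append_assoc]

theorem pvBuildMoves_eq_flatMap (l r : Int) (q : List (Int × Int)) :
    pvBuildMoves l r q = q.flatMap (pvEntry l r) := by
  unfold pvBuildMoves
  rw [pvBuildAux_eq]
  rfl

theorem pvMemLoop_eq_none (l r : Int) (q : List (Int × Int)) (h : (l, r) ∉ q) :
    pvMemLoop l r q = none := by
  induction q with
  | nil => rfl
  | cons p rest ih =>
    obtain ⟨pl, pr⟩ := p
    simp only [List.mem_cons, not_or] at h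
    simp only [pvMemLoop]
    rw [if_neg (fun ⟨h1, h2⟩ => h.1 (by rw [h1, h2])), ih h.2]

theorem pvMemLoop_eq_some (l r : Int) (q : List (Int × Int)) (h : (l, r) ∈ q) :
    pvMemLoop l r q = some (if l > r then (1, some "L") else (1, some "R")) := by
  induction q with
  | nil => cases h
  | cons p rest ih =>
    obtain ⟨pl, pr⟩ := p
    simp only [pvMemLoop]
    by_cases hp : l = pl ∧ r = pr
    · rw [if_pos hp]
    · rw [if_neg hp]
      apply ih
      rcases List.mem_cons.mp h with h1 | h2
      · injection h1 with e1 e2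
        exact absurd ⟨e1, e2⟩ hp
      · exact h2

theorem pvScanL (l r num : Int) (rest : List (String × Int)) :
    pvScanLoop l r (("L", num) :: rest) =
      if num ≤ l then (if l - num = 0 ∧ r = 0 then pvScanLoop l r rest else (num, some "L"))
      else pvScanLoop l r rest := by
  simp [pvScanLoop]

theorem pvScanR (l r num : Int) (rest : List (String × Int)) :
    pvScanLoop l r (("R", num) :: rest) =
      if num ≤ r then (if l = 0 ∧ r - num = 0 then pvScanLoop l r rest else (num, some "R"))
      else pvScanLoop l r rest := by
  simp [pvScanLoop]

theorem pvScanB (l r num : Int) (rest : List (String × Int)) :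
    pvScanLoop l r (("B", num) :: rest) =
      if num ≤ min l r then (if l - num = 0 ∧ r - num = 0 then pvScanLoop l r rest else (num, some "B"))
      else pvScanLoop l r rest := by
  simp [pvScanLoop]

set_option maxHeartbeats 1000000 in
theorem pvScan_flatMap (l r : Int) (q : List (Int × Int)) :
    pvScanLoop l r (q.flatMap (pvEntry l r)) = pvAltLoop l r q := by
  induction q with
  | nil => rfl
  | cons p rest ih =>
    obtain ⟨ql, qr⟩ := p
    rw [List.flatMap_cons]
    show pvScanLoop l r (pvEntry l r (ql, qr) ++ rest.flatMap (pvEntry l r)) =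
      pvAltLoop l r ((ql, qr) :: rest)
    rw [show pvAltLoop l r ((ql, qr) :: rest) =
      (if 0 ≤ ql ∧ ql ≤ l ∧ qr = r ∧ ¬(ql = 0 ∧ r = 0) then (l - ql, some "L")
       else if 0 ≤ qr ∧ qr ≤ r ∧ ql = l ∧ ¬(l = 0 ∧ qr = 0) then (r - qr, some "R")
       else if 0 ≤ ql ∧ ql ≤ l ∧ 0 ≤ qr ∧ qr ≤ r ∧ l - ql = r - qr ∧ ¬(ql = 0 ∧ qr = 0) then (l - ql, some "B")
       else pvAltLoop l r rest) from rfl]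
    unfold pvEntry
    by_cases cL : ql ≤ l ∧ qr = r
    · by_cases cR : qr ≤ r ∧ ql = l
      · by_cases cB : ql ≤ l ∧ qr ≤ r ∧ l - ql = r - qr
        · rw [if_pos cL, if_pos cR, if_pos cB]
          simp only [List.cons_append, List.nil_append]
          rw [pvScanL, pvScanR, pvScanB, ← ih]
          split_ifs <;> first | rfl | omega
        · rw [if_pos cL, if_pos cR, if_neg cB]
          simp only [List.cons_append, List.nil_append]
          rw [pvScanL, pvScanR, ← ih]
          split_ifs <;> first | rfl | omega
      · by_cases cB : ql ≤ l ∧ qr ≤ r ∧ l - ql = r - qr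
        · rw [if_pos cL, if_neg cR, if_pos cB]
          simp only [List.cons_append, List.nil_append]
          rw [pvScanL, pvScanB, ← ih]
          split_ifs <;> first | rfl | omega
        · rw [if_pos cL, if_neg cR, if_neg cB]
          simp only [List.cons_append, List.nil_append]
          rw [pvScanL, ← ih]
          split_ifs <;> first | rfl | omega
    · by_cases cR : qr ≤ r ∧ ql = l
      · by_cases cB : ql ≤ l ∧ qr ≤ r ∧ l - ql = r - qr
        · rw [if_neg cL, if_pos cR, if_pos cB]
          simp only [List.cons_append, List.nil_append]
          rw [pvScanR, pvScanB, ← ih]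
          split_ifs <;> first | rfl | omega
        · rw [if_neg cL, if_pos cR, if_neg cB]
          simp only [List.cons_append, List.nil_append]
          rw [pvScanR, ← ih]
          split_ifs <;> first | rfl | omega
      · by_cases cB : ql ≤ l ∧ qr ≤ r ∧ l - ql = r - qr
        · rw [if_neg cL, if_neg cR, if_pos cB]
          simp only [List.cons_append, List.nil_append]
          rw [pvScanB, ← ih]
          split_ifs <;> first | rfl | omega
        · rw [if_neg cL, if_neg cR, if_neg cB]
          simp only [List.nil_append]
          rw [← ih]
          split_ifs <;> first | rfl | omega

-- B's argmin selection computes the single-scan characterisation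
theorem pvSelect_eq_altLoop (l r : Int) (q : List (Int × Int)) :
    pvSelect l r q = pvAltLoop l r q := by
  induction q with
  | nil => rfl
  | cons p rest ih =>
    obtain ⟨ql, qr⟩ := p
    simp only [pvAltLoop]
    by_cases cL : 0 ≤ ql ∧ ql ≤ l ∧ qr = r ∧ ¬(ql = 0 ∧ r = 0)
    · have hL : pvCondL l r (ql, qr) = true := by unfold pvCondL; exact decide_eq_true cL
      rw [if_pos cL]
      simp only [pvSelect, List.findIdx_cons, hL, cond_true, Nat.zero_min, List.length_cons,
        List.getD_cons_zero]
      rw [if_neg (by omega)]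
      simp
    · have hL : pvCondL l r (ql, qr) = false := by unfold pvCondL; exact decide_eq_false cL
      rw [if_neg cL]
      by_cases cR : 0 ≤ qr ∧ qr ≤ r ∧ ql = l ∧ ¬(l = 0 ∧ qr = 0)
      · have hR : pvCondR l r (ql, qr) = true := by unfold pvCondR; exact decide_eq_true cR
        rw [if_pos cR]
        simp only [pvSelect, List.findIdx_cons, hL, hR, cond_true, cond_false, Nat.zero_min,
          Nat.min_zero, List.length_cons, List.getD_cons_zero]
        rw [if_neg (by omega), if_neg (by omega)]
        simp
      · have hR : pvCondR l r (ql, qr) = false := by unfold pvCondR; exact decide_eq_false cR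
        rw [if_neg cR]
        by_cases cB : 0 ≤ ql ∧ ql ≤ l ∧ 0 ≤ qr ∧ qr ≤ r ∧ l - ql = r - qr ∧ ¬(ql = 0 ∧ qr = 0)
        · have hB : pvCondB l r (ql, qr) = true := by unfold pvCondB; exact decide_eq_true cB
          rw [if_pos cB]
          simp only [pvSelect, List.findIdx_cons, hL, hR, hB, cond_true, cond_false,
            Nat.min_zero, List.length_cons, List.getD_cons_zero]
          rw [if_neg (by omega), if_neg (by omega), if_neg (by omega)]
        · have hB : pvCondB l r (ql, qr) = false := by unfold pvCondB; exact decide_eq_false cB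
          rw [if_neg cB, ← ih]
          simp only [pvSelect, List.findIdx_cons, hL, hR, hB, cond_false, List.length_cons]
          generalize List.findIdx (pvCondL l r) rest = a
          generalize List.findIdx (pvCondR l r) rest = b
          generalize List.findIdx (pvCondB l r) rest = c
          have hmin : min (a + 1) (min (b + 1) (c + 1)) = min a (min b c) + 1 := by omega
          rw [hmin]
          simp only [List.getD_cons_succ]
          by_cases he : min a (min b c) = rest.length
          · rw [if_pos (by omega), if_pos he]
          · rw [if_neg (by omega), if_neg he]
            by_cases ha : a = min a (min b c)
            · rw [if_pos (by omega), if_pos ha]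
            · rw [if_neg (by omega), if_neg ha]
              by_cases hb : b = min a (min b c)
              · rw [if_pos (by omega), if_pos hb]
              · rw [if_neg (by omega), if_neg hb]

-- ===== VERDICT (by name: the statement is the Claim_ definition above) =====
theorem determine_computer_move_spec : Claim_equal_determine_computer_move := by
  intro q l r _
  unfold Spec_determine_computer_move determine_computer_move determine_computer_move_alt
  by_cases h0 : l = 0 ∧ r = 0
  · simp [h0]
  · rw [if_neg h0, if_neg h0]
    by_cases hm : (l, r) ∈ q
    · rw [pvMemLoop_eq_some l r q hm, if_pos hm]
    · rw [pvMemLoop_eq_none l r q hm, if_neg hm]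
      rw [pvSelect_eq_altLoop]
      show (if pvBuildMoves l r q ≠ [] then pvScanLoop l r (pvBuildMoves l r q)
        else if l > r then (1, some "L") else (1, some "R")) = pvAltLoop l r q
      by_cases hne : pvBuildMoves l r q = []
      · rw [if_neg (by simp [hne])]
        have : (if l > r then ((1 : Int), some "L") else (1, some "R")) = pvScanLoop l r [] := rfl
        rw [this, ← hne, pvBuildMoves_eq_flatMap, pvScan_flatMap]
      · rw [if_pos hne, pvBuildMoves_eq_flatMap, pvScan_flatMap]
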